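-- pv_equiv track=rewrite | github.com/UTAHOGA/HUNT-PLANNER | scripts/build-hunt-research-view-2026.py | build_metadata_map
-- ===== SOURCE A (Python) =====
-- METADATA_FIELDS = [
--     "species",
--     "hunt_type",
--     "weapon",
--     "access_type",
--     "percent_success",
--     "harvest",
--     "satisfaction",
--     "avg_days",
-- ]
--
-- def build_metadata_map(rows: list[dict[str, str]]) -> tuple[dict[str, dict[str, str]], list[str]]:
--     metadata_map: dict[str, dict[str, str]] = {}
--     collisions: list[str] = []
--     for row in rows:
--         hunt_code = row["hunt_code"]
--         if hunt_code in metadata_map: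
--             collisions.append(hunt_code)
--             continue
--         metadata_map[hunt_code] = {field: row.get(field, "") for field in METADATA_FIELDS}
--     return metadata_map, sorted(set(collisions))
-- ===== SOURCE B (Python) =====
-- METADATA_FIELDS = [
--     "species",
--     "hunt_type",
--     "weapon",
--     "access_type",
--     "percent_success",
--     "harvest",
--     "satisfaction",
--     "avg_days",
-- ]
--
-- def build_metadata_map(rows: list[dict[str, str]]) -> tuple[dict[str, dict[str, str]], list[str]]:
--     # pass 1: collision detection only (seen-set / duplicates-set)
--     seen: set[str] = set()
--     dupes: set[str] = set()
--     for row in rows: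
--         code = row["hunt_code"]
--         if code in seen:
--             dupes.add(code)
--         else:
--             seen.add(code)
--     # pass 2: metadata map, first occurrence wins
--     metadata_map: dict[str, dict[str, str]] = {}
--     for row in rows:
--         code = row["hunt_code"]
--         if code not in metadata_map:
--             metadata_map[code] = {field: row.get(field, "") for field in METADATA_FIELDS}
--     return metadata_map, sorted(dupes)
-- ===== Notes on version B (the rewrite author's own statement) =====
-- stated objective: alternative
-- what changed: Replaces A's single interleaved loop (map construction plus a collisions list later deduplicated and sorted) by two separate passes: a seen-set/duplicates-set pass that detects collisions directly as a set, then a pass that builds the first-occurrence metadata map.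
import Mathlib
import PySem

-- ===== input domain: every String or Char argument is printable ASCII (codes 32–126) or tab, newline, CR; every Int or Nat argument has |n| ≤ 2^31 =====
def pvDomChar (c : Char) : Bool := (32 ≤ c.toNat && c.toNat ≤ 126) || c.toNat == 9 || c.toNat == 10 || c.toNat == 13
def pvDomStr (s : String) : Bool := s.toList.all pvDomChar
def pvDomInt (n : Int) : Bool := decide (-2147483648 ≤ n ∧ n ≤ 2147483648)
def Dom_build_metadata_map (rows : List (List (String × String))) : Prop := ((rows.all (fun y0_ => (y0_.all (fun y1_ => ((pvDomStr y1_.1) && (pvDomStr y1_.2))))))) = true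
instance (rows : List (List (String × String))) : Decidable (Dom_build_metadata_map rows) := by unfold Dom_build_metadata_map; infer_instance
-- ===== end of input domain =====

-- B separates collision detection (seen-set/duplicates-set pass) from map construction
-- (second first-occurrence pass), instead of A's single interleaved loop; objective: alternative.


-- ===== PORT A =====
def pvMetaFields : List String :=
  ["species", "hunt_type", "weapon", "access_type",
   "percent_success", "harvest", "satisfaction", "avg_days"]

-- row["hunt_code"]: first-match lookup (KeyError case excluded by Pre_, total via getD "")
def pvHuntCode (row : List (String × String)) : String :=
  (row.lookup "hunt_code").getD ""

-- {field: row.get(field, "") for field in METADATA_FIELDS}: distinct literal keys, insertion order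
def pvRowMeta (row : List (String × String)) : List (String × String) :=
  pvMetaFields.map (fun f => (f, (row.lookup f).getD ""))

def build_metadata_map (rows : List (List (String × String))) : (List (String × List (String × String))) × List String :=
  let st := rows.foldl
    (fun (st : PySem.Dict String (List (String × String)) × List String) row =>
      let hc := pvHuntCode row
      if st.1.contains hc then (st.1, st.2 ++ [hc])
      else (st.1.insert hc (pvRowMeta row), st.2))
    (PySem.Dict.empty, [])
  (st.1.items, PySem.List.sorted (PySem.Set.ofList st.2) (fun x => x) false)

-- ===== PORT B =====
def build_metadata_map_alt (rows : List (List (String × String))) : (List (String × List (String × String))) × List String :=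
  -- pass 1: seen / dupes sets
  let sd := rows.foldl
    (fun (sd : PySem.Set String × PySem.Set String) row =>
      let hc := pvHuntCode row
      if PySem.Set.contains sd.1 hc then (sd.1, PySem.Set.add sd.2 hc)
      else (PySem.Set.add sd.1 hc, sd.2))
    (PySem.Set.empty, PySem.Set.empty)
  -- pass 2: first-occurrence metadata map
  let m := rows.foldl
    (fun (m : PySem.Dict String (List (String × String))) row =>
      let hc := pvHuntCode row
      if m.contains hc then m else m.insert hc (pvRowMeta row))
    PySem.Dict.empty
  (m.items, PySem.List.sorted sd.2 (fun x => x) false)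

-- ===== PRECONDITION & SPEC =====
-- Pre_: every row has the key "hunt_code"; on other inputs Python A raises KeyError.
def Pre_build_metadata_map (rows : List (List (String × String))) : Prop :=
  (rows.all (fun row => row.any (fun p => p.1 == "hunt_code"))) = true
instance (rows : List (List (String × String))) : Decidable (Pre_build_metadata_map rows) := by
  unfold Pre_build_metadata_map; infer_instance

def pvWitness_build_metadata_map : (List (List (String × String))) :=
  [[("hunt_code", "A1"), ("species", "elk")], [("hunt_code", "A1")], [("hunt_code", "B2")]]

def Spec_build_metadata_map (rows : List (List (String × String))) (out : (List (String × List (String × String))) × List String) : Prop := out = build_metadata_map_alt rows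
instance (rows : List (List (String × String))) (out : (List (String × List (String × String))) × List String) : Decidable (Spec_build_metadata_map rows out) := by unfold Spec_build_metadata_map; infer_instance

-- ===== CLAIM (what is proved, stated in full; the proofs are below) =====
def Claim_equal_build_metadata_map : Prop := ∀ (rows : List (List (String × String))), Dom_build_metadata_map rows → Pre_build_metadata_map rows → Spec_build_metadata_map rows (build_metadata_map rows)

-- ===== LEMMAS AND PROOFS =====

-- The map component of A's interleaved fold equals B's second pass.
theorem pv_map_eq (rows : List (List (String × String)))
    (m : PySem.Dict String (List (String × String))) (c : List String) :
    (rows.foldl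
      (fun (st : PySem.Dict String (List (String × String)) × List String) row =>
        let hc := pvHuntCode row
        if st.1.contains hc then (st.1, st.2 ++ [hc])
        else (st.1.insert hc (pvRowMeta row), st.2)) (m, c)).1
    = rows.foldl
      (fun (m : PySem.Dict String (List (String × String))) row =>
        let hc := pvHuntCode row
        if m.contains hc then m else m.insert hc (pvRowMeta row)) m := by
  induction rows generalizing m c with
  | nil => rfl
  | cons r rs ih =>
    simp only [List.foldl_cons]
    by_cases h : m.contains (pvHuntCode r) = true
    · simp [h, ih]
    · simp [h, ih]

-- The deduplicated collision list of A's fold equals B's dupes set, given the invariant.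
theorem pv_dupes_eq (rows : List (List (String × String)))
    (m : PySem.Dict String (List (String × String))) (c : List String)
    (seen dupes : PySem.Set String)
    (hmc : ∀ x, m.contains x = PySem.Set.contains seen x)
    (hcd : PySem.Set.ofList c = dupes) :
    PySem.Set.ofList
      (rows.foldl
        (fun (st : PySem.Dict String (List (String × String)) × List String) row =>
          let hc := pvHuntCode row
          if st.1.contains hc then (st.1, st.2 ++ [hc])
          else (st.1.insert hc (pvRowMeta row), st.2)) (m, c)).2
    = (rows.foldl
        (fun (sd : PySem.Set String × PySem.Set String) row =>
          let hc := pvHuntCode row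
          if PySem.Set.contains sd.1 hc then (sd.1, PySem.Set.add sd.2 hc)
          else (PySem.Set.add sd.1 hc, sd.2)) (seen, dupes)).2 := by
  induction rows generalizing m c seen dupes with
  | nil => simpa using hcd
  | cons r rs ih =>
    simp only [List.foldl_cons]
    by_cases h : PySem.Set.contains seen (pvHuntCode r) = true
    · simp only [hmc, h, if_pos]
      exact ih m (c ++ [pvHuntCode r]) seen (PySem.Set.add dupes (pvHuntCode r)) hmc
        (by rw [PySem.Set.ofList, List.foldl_append, ← PySem.Set.ofList, hcd]; rfl)
    · simp only [hmc, h, if_neg, Bool.false_eq_true, not_false_iff]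
      have hmem : pvHuntCode r ∉ seen := by simpa [PySem.Set.contains] using h
      refine ih _ c (PySem.Set.add seen (pvHuntCode r)) dupes (fun x => ?_) hcd
      rw [PySem.Dict.contains_insert, hmc]
      simp only [PySem.Set.contains, PySem.Set.add]
      by_cases hx : x = pvHuntCode r
      · simp [hx, hmem]
      · simp [hx, hmem]

-- ===== VERDICT (by name: the statement is the Claim_ definition above) =====
theorem build_metadata_map_spec : Claim_equal_build_metadata_map := by
  intro rows _ _
  unfold Spec_build_metadata_map build_metadata_map build_metadata_map_alt
  refine Prod.ext ?_ ?_
  · simp only []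
    rw [pv_map_eq]
  · simp only []
    rw [pv_dupes_eq rows PySem.Dict.empty [] PySem.Set.empty PySem.Set.empty
      (fun x => by rfl) rfl]
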